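-- pv_equiv track=rewrite | github.com/notemilianogarcia/pocket-guide | src/pocketguide/data_generation/split_dataset_v1.py | compute_split_distributions
-- ===== SOURCE A (Python) =====
-- from collections import defaultdict
-- from typing import Any, Dict, List, Set, Tuple, Optional
--
-- def compute_split_distributions(
--     records: List[Dict[str, Any]],
--     record_to_split: Dict[str, str]
-- ) -> Dict[str, Dict[str, Dict[str, int]]]:
--     """Compute distributions per split."""
--     distributions = {
--         'train': defaultdict(lambda: defaultdict(int)),
--         'val': defaultdict(lambda: defaultdict(int)),
--         'test': defaultdict(lambda: defaultdict(int))
--     }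
--
--     for record in records:
--         rec_id = record["id"]
--         split_name = record_to_split.get(rec_id)
--         if not split_name:
--             continue
--
--         # Category
--         category = record.get("category", "unknown")
--         distributions[split_name]['category'][category] += 1
--
--         # Difficulty
--         difficulty = record.get("difficulty", "medium")
--         distributions[split_name]['difficulty'][difficulty] += 1
--
--         # Payload type
--         payload_type = record.get("payload_type", "unknown")
--         distributions[split_name]['payload_type'][payload_type] += 1
--
--     # Convert to regular dicts
--     result = {}
--     for split_name in ['train', 'val', 'test']:
--         result[split_name] = {
--             'category': dict(distributions[split_name]['category']),
--             'difficulty': dict(distributions[split_name]['difficulty']),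
--             'payload_type': dict(distributions[split_name]['payload_type'])
--         }
--
--     return result
-- ===== SOURCE B (Python) =====
-- from collections import Counter
--
-- def compute_split_distributions(records, record_to_split):
--     groups = {'train': [], 'val': [], 'test': []}
--     for record in records:
--         split_name = record_to_split.get(record["id"])
--         if not split_name:
--             continue
--         groups[split_name].append(record)
--
--     result = {}
--     for split_name, group in groups.items():
--         result[split_name] = {
--             'category': dict(Counter(r.get('category', 'unknown') for r in group)),
--             'difficulty': dict(Counter(r.get('difficulty', 'medium') for r in group)),
--             'payload_type': dict(Counter(r.get('payload_type', 'unknown') for r in group)),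
--         }
--     return result
-- ===== Notes on version B (the rewrite author's own statement) =====
-- stated objective: simpler
-- what changed: B first partitions the records into the three fixed split lists in one pass and then builds each per-split field distribution with collections.Counter over the group, instead of A's single loop incrementing a nested defaultdict-of-defaultdict state.
import Mathlib
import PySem

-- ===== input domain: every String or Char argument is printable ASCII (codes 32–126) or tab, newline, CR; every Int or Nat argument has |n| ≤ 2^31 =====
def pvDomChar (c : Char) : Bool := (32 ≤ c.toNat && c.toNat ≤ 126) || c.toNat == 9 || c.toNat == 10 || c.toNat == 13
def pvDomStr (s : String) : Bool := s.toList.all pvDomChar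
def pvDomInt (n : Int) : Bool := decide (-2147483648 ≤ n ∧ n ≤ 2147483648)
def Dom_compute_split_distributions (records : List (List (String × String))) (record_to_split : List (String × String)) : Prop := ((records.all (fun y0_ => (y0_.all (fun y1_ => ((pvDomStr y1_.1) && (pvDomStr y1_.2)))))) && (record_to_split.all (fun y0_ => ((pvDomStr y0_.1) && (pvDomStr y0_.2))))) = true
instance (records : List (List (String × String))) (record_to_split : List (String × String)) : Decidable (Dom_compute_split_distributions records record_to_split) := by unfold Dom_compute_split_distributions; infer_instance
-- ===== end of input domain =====

-- B groups the records per split in one pass and then counts each field with collections.Counter,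
-- replacing A's single loop over a nested defaultdict-of-defaultdict state (objective: simpler decomposition).

-- ===== PORT A =====
-- one iteration of A's `for record in records` loop over the nested distributions state
def pvAStep (record_to_split : List (String × String))
    (st : PySem.Dict String (PySem.Dict String (PySem.Dict String Int)))
    (record : List (String × String)) :
    PySem.Dict String (PySem.Dict String (PySem.Dict String Int)) :=
  match (PySem.Dict.mk record).get? "id" with
  | none => st          -- record["id"] raises KeyError: excluded by Pre_
  | some rec_id =>
    match (PySem.Dict.mk record_to_split).get? rec_id with
    | none => st
    | some split_name =>
      if split_name = "" then st   -- `if not split_name: continue`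
      else
        let category := (PySem.Dict.mk record).getD "category" "unknown"
        let difficulty := (PySem.Dict.mk record).getD "difficulty" "medium"
        let payload_type := (PySem.Dict.mk record).getD "payload_type" "unknown"
        -- distributions[split_name][field][value] += 1 ; split_name ∉ {train,val,test} raises KeyError (excluded by Pre_)
        let st := st.modify split_name PySem.Dict.empty (fun s => s.modify "category" PySem.Dict.empty (fun c => c.modify category 0 (· + 1)))
        let st := st.modify split_name PySem.Dict.empty (fun s => s.modify "difficulty" PySem.Dict.empty (fun c => c.modify difficulty 0 (· + 1)))
        let st := st.modify split_name PySem.Dict.empty (fun s => s.modify "payload_type" PySem.Dict.empty (fun c => c.modify payload_type 0 (· + 1)))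
        st

def compute_split_distributions (records : List (List (String × String))) (record_to_split : List (String × String)) : List (String × List (String × List (String × Int))) :=
  let distributions := ((PySem.Dict.empty.insert "train" PySem.Dict.empty).insert "val" PySem.Dict.empty).insert "test" PySem.Dict.empty
  let distributions := records.foldl (pvAStep record_to_split) distributions
  ["train", "val", "test"].map (fun split_name =>
    let d := distributions.getD split_name PySem.Dict.empty
    (split_name,
      [("category", (d.getD "category" PySem.Dict.empty).items),
       ("difficulty", (d.getD "difficulty" PySem.Dict.empty).items),
       ("payload_type", (d.getD "payload_type" PySem.Dict.empty).items)]))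

-- ===== PORT B =====
-- one iteration of B's grouping loop: append the record to its split's list
def pvBStep (record_to_split : List (String × String))
    (groups : PySem.Dict String (List (List (String × String))))
    (record : List (String × String)) :
    PySem.Dict String (List (List (String × String))) :=
  match (PySem.Dict.mk record).get? "id" with
  | none => groups      -- record["id"] raises KeyError: excluded by Pre_
  | some rec_id =>
    match (PySem.Dict.mk record_to_split).get? rec_id with
    | none => groups
    | some split_name =>
      if split_name = "" then groups
      else groups.modify split_name [] (· ++ [record])   -- groups[split_name].append(record)

-- dict(Counter(r.get(field, dflt) for r in group))
def pvCountField (group : List (List (String × String))) (field dflt : String) : List (String × Int) :=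
  (PySem.Dict.counter (group.map (fun r => (PySem.Dict.mk r).getD field dflt))).items

def compute_split_distributions_alt (records : List (List (String × String))) (record_to_split : List (String × String)) : List (String × List (String × List (String × Int))) :=
  let groups := records.foldl (pvBStep record_to_split)
    (((PySem.Dict.empty.insert "train" []).insert "val" []).insert "test" [])
  groups.items.map (fun p =>
    (p.1,
      [("category", pvCountField p.2 "category" "unknown"),
       ("difficulty", pvCountField p.2 "difficulty" "medium"),
       ("payload_type", pvCountField p.2 "payload_type" "unknown")]))

-- ===== PRECONDITION & SPEC =====
-- Pre_ excludes exactly the inputs where A (and B alike) raises KeyError: a record without an "id"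
-- key, or a record mapped to a non-empty split other than train/val/test.
def Pre_compute_split_distributions (records : List (List (String × String))) (record_to_split : List (String × String)) : Prop :=
  records.all (fun r =>
    match (PySem.Dict.mk r).get? "id" with
    | none => false
    | some i =>
      match (PySem.Dict.mk record_to_split).get? i with
      | none => true
      | some s => s == "" || s == "train" || s == "val" || s == "test") = true
instance (records : List (List (String × String))) (record_to_split : List (String × String)) : Decidable (Pre_compute_split_distributions records record_to_split) := by unfold Pre_compute_split_distributions; infer_instance

def pvWitness_compute_split_distributions : (List (List (String × String))) × (List (String × String)) :=
  ([[("id", "a"), ("category", "b")], [("id", "c")]], [("a", "train"), ("c", "val")])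

def Spec_compute_split_distributions (records : List (List (String × String))) (record_to_split : List (String × String)) (out : List (String × List (String × List (String × Int)))) : Prop := out = compute_split_distributions_alt records record_to_split
instance (records : List (List (String × String))) (record_to_split : List (String × String)) (out : List (String × List (String × List (String × Int)))) : Decidable (Spec_compute_split_distributions records record_to_split out) := by unfold Spec_compute_split_distributions; infer_instance

-- ===== CLAIM (what is proved, stated in full; the proofs are below) =====
def Claim_equal_compute_split_distributions : Prop := ∀ (records : List (List (String × String))) (record_to_split : List (String × String)), Dom_compute_split_distributions records record_to_split → Pre_compute_split_distributions records record_to_split → Spec_compute_split_distributions records record_to_split (compute_split_distributions records record_to_split)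

-- ===== LEMMAS AND PROOFS =====

-- the effective split of a record: `some s` iff A (and B) counts the record under split s
def pvSplit (record_to_split : List (String × String)) (r : List (String × String)) : Option String :=
  match (PySem.Dict.mk r).get? "id" with
  | none => none
  | some i =>
    match (PySem.Dict.mk record_to_split).get? i with
    | none => none
    | some s => if s = "" then none else some s

lemma pvAStep_eq (r2s : List (String × String)) (st : PySem.Dict String (PySem.Dict String (PySem.Dict String Int))) (r : List (String × String)) :
    pvAStep r2s st r =
      match pvSplit r2s r with
      | none => st
      | some sp =>
        ((st.modify sp PySem.Dict.empty (fun s => s.modify "category" PySem.Dict.empty (fun c => c.modify ((PySem.Dict.mk r).getD "category" "unknown") 0 (· + 1)))).modify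
            sp PySem.Dict.empty (fun s => s.modify "difficulty" PySem.Dict.empty (fun c => c.modify ((PySem.Dict.mk r).getD "difficulty" "medium") 0 (· + 1)))).modify
            sp PySem.Dict.empty (fun s => s.modify "payload_type" PySem.Dict.empty (fun c => c.modify ((PySem.Dict.mk r).getD "payload_type" "unknown") 0 (· + 1))) := by
  cases h1 : (PySem.Dict.mk r).get? "id" with
  | none => simp [pvAStep, pvSplit, h1]
  | some i =>
    cases h2 : (PySem.Dict.mk r2s).get? i with
    | none => simp [pvAStep, pvSplit, h1, h2]
    | some s => by_cases h : s = "" <;> simp [pvAStep, pvSplit, h1, h2, h]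

lemma pvBStep_eq (r2s : List (String × String)) (g : PySem.Dict String (List (List (String × String)))) (r : List (String × String)) :
    pvBStep r2s g r =
      match pvSplit r2s r with
      | none => g
      | some sp => g.modify sp [] (· ++ [r]) := by
  cases h1 : (PySem.Dict.mk r).get? "id" with
  | none => simp [pvBStep, pvSplit, h1]
  | some i =>
    cases h2 : (PySem.Dict.mk r2s).get? i with
    | none => simp [pvBStep, pvSplit, h1, h2]
    | some s => by_cases h : s = "" <;> simp [pvBStep, pvSplit, h1, h2, h]

-- A's outer fold, projected to one split, is a fold over the records of that split
lemma pvA_outer (r2s : List (String × String)) (s : String) :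
    ∀ (rs : List (List (String × String))) (st : PySem.Dict String (PySem.Dict String (PySem.Dict String Int))),
      (rs.foldl (pvAStep r2s) st).getD s PySem.Dict.empty =
        (rs.filter (fun r => pvSplit r2s r == some s)).foldl
          (fun d r =>
            ((d.modify "category" PySem.Dict.empty (fun c => c.modify ((PySem.Dict.mk r).getD "category" "unknown") 0 (· + 1))).modify
                "difficulty" PySem.Dict.empty (fun c => c.modify ((PySem.Dict.mk r).getD "difficulty" "medium") 0 (· + 1))).modify
                "payload_type" PySem.Dict.empty (fun c => c.modify ((PySem.Dict.mk r).getD "payload_type" "unknown") 0 (· + 1)))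
          (st.getD s PySem.Dict.empty) := by
  intro rs
  induction rs with
  | nil => intro st; rfl
  | cons r rs ih =>
    intro st
    simp only [List.foldl_cons, List.filter_cons, pvAStep_eq]
    cases h : pvSplit r2s r with
    | none => simp [ih]
    | some sp =>
      by_cases hsp : sp = s
      · subst hsp
        simp [ih, PySem.Dict.getD_modify_self]
      · simp only [beq_iff_eq, Option.some.injEq, hsp, if_false]
        rw [ih,
          PySem.Dict.getD_modify_of_ne _ _ _ (Ne.symm hsp),
          PySem.Dict.getD_modify_of_ne _ _ _ (Ne.symm hsp),
          PySem.Dict.getD_modify_of_ne _ _ _ (Ne.symm hsp)]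

-- B's grouping fold, projected to one split, collects exactly that split's records
lemma pvB_outer (r2s : List (String × String)) (s : String) :
    ∀ (rs : List (List (String × String))) (g : PySem.Dict String (List (List (String × String)))),
      (rs.foldl (pvBStep r2s) g).getD s [] =
        g.getD s [] ++ rs.filter (fun r => pvSplit r2s r == some s) := by
  intro rs
  induction rs with
  | nil => intro g; simp
  | cons r rs ih =>
    intro g
    simp only [List.foldl_cons, List.filter_cons, pvBStep_eq]
    cases h : pvSplit r2s r with
    | none => simp [ih]
    | some sp =>
      by_cases hsp : sp = s
      · subst hsp
        simp [ih, PySem.Dict.getD_modify_self]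
      · simp only [beq_iff_eq, Option.some.injEq, hsp, if_false]
        rw [ih, PySem.Dict.getD_modify_of_ne _ _ _ (Ne.symm hsp)]

-- projecting the per-split counting fold to one of the three field counters
lemma pvField_cat (gs : List (List (String × String))) :
    ∀ (d : PySem.Dict String (PySem.Dict String Int)),
      (gs.foldl (fun d r =>
            ((d.modify "category" PySem.Dict.empty (fun c => c.modify ((PySem.Dict.mk r).getD "category" "unknown") 0 (· + 1))).modify
                "difficulty" PySem.Dict.empty (fun c => c.modify ((PySem.Dict.mk r).getD "difficulty" "medium") 0 (· + 1))).modify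
                "payload_type" PySem.Dict.empty (fun c => c.modify ((PySem.Dict.mk r).getD "payload_type" "unknown") 0 (· + 1))) d).getD "category" PySem.Dict.empty =
      gs.foldl (fun c r => c.modify ((PySem.Dict.mk r).getD "category" "unknown") 0 (· + 1)) (d.getD "category" PySem.Dict.empty) := by
  induction gs with
  | nil => intro d; rfl
  | cons r gs ih =>
    intro d
    simp only [List.foldl_cons]
    rw [ih]
    rw [PySem.Dict.getD_modify_of_ne _ _ _ (by decide), PySem.Dict.getD_modify_of_ne _ _ _ (by decide),
        PySem.Dict.getD_modify_self]

lemma pvField_diff (gs : List (List (String × String))) :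
    ∀ (d : PySem.Dict String (PySem.Dict String Int)),
      (gs.foldl (fun d r =>
            ((d.modify "category" PySem.Dict.empty (fun c => c.modify ((PySem.Dict.mk r).getD "category" "unknown") 0 (· + 1))).modify
                "difficulty" PySem.Dict.empty (fun c => c.modify ((PySem.Dict.mk r).getD "difficulty" "medium") 0 (· + 1))).modify
                "payload_type" PySem.Dict.empty (fun c => c.modify ((PySem.Dict.mk r).getD "payload_type" "unknown") 0 (· + 1))) d).getD "difficulty" PySem.Dict.empty =
      gs.foldl (fun c r => c.modify ((PySem.Dict.mk r).getD "difficulty" "medium") 0 (· + 1)) (d.getD "difficulty" PySem.Dict.empty) := by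
  induction gs with
  | nil => intro d; rfl
  | cons r gs ih =>
    intro d
    simp only [List.foldl_cons]
    rw [ih]
    rw [PySem.Dict.getD_modify_of_ne _ _ _ (by decide)]
    rw [PySem.Dict.getD_modify_self, PySem.Dict.getD_modify_of_ne _ _ _ (by decide)]

lemma pvField_pt (gs : List (List (String × String))) :
    ∀ (d : PySem.Dict String (PySem.Dict String Int)),
      (gs.foldl (fun d r =>
            ((d.modify "category" PySem.Dict.empty (fun c => c.modify ((PySem.Dict.mk r).getD "category" "unknown") 0 (· + 1))).modify
                "difficulty" PySem.Dict.empty (fun c => c.modify ((PySem.Dict.mk r).getD "difficulty" "medium") 0 (· + 1))).modify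
                "payload_type" PySem.Dict.empty (fun c => c.modify ((PySem.Dict.mk r).getD "payload_type" "unknown") 0 (· + 1))) d).getD "payload_type" PySem.Dict.empty =
      gs.foldl (fun c r => c.modify ((PySem.Dict.mk r).getD "payload_type" "unknown") 0 (· + 1)) (d.getD "payload_type" PySem.Dict.empty) := by
  induction gs with
  | nil => intro d; rfl
  | cons r gs ih =>
    intro d
    simp only [List.foldl_cons]
    rw [ih]
    rw [PySem.Dict.getD_modify_self, PySem.Dict.getD_modify_of_ne _ _ _ (by decide),
        PySem.Dict.getD_modify_of_ne _ _ _ (by decide)]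

-- B's groups dict keeps exactly the keys train/val/test when every split of the records is one of them
lemma pvB_keys (r2s : List (String × String)) :
    ∀ (rs : List (List (String × String))) (g : PySem.Dict String (List (List (String × String)))),
      (∀ r ∈ rs, ∀ sp, pvSplit r2s r = some sp → g.contains sp = true) →
      (rs.foldl (pvBStep r2s) g).keys = g.keys := by
  intro rs
  induction rs with
  | nil => intro g _; rfl
  | cons r rs ih =>
    intro g hg
    simp only [List.foldl_cons, pvBStep_eq]
    cases h : pvSplit r2s r with
    | none => exact ih g (fun r' hr' => hg r' (List.mem_cons_of_mem _ hr'))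
    | some sp =>
      have hc : g.contains sp = true := hg r (List.mem_cons_self) sp h
      rw [ih]
      · rw [PySem.Dict.keys_modify, PySem.Dict.keys_insert_of_contains _ _ hc]
      · intro r' hr' sp' hsp'
        rw [PySem.Dict.contains_modify]
        simp [hg r' (List.mem_cons_of_mem _ hr') sp' hsp']

-- counting a field over a group of records is Counter of the mapped values
lemma pvCount_eq (gs : List (List (String × String))) (f dflt : String) :
    PySem.Dict.counter (gs.map (fun r => (PySem.Dict.mk r).getD f dflt)) =
      gs.foldl (fun c r => c.modify ((PySem.Dict.mk r).getD f dflt) 0 (· + 1)) PySem.Dict.empty := by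
  rw [PySem.Dict.counter_eq_foldl, List.foldl_map]

theorem compute_split_distributions_spec : Claim_equal_compute_split_distributions := by
  intro records r2s _hdom hpre
  unfold Pre_compute_split_distributions at hpre
  rw [List.all_eq_true] at hpre
  unfold Spec_compute_split_distributions
  simp only [compute_split_distributions, compute_split_distributions_alt]
  have hsplits : ∀ r ∈ records, ∀ sp, pvSplit r2s r = some sp →
      ((((PySem.Dict.empty.insert "train" ([] : List (List (String × String)))).insert "val" []).insert "test" []).contains sp) = true := by
    intro r hr sp hsp
    have hpr := hpre r hr
    unfold pvSplit at hsp
    cases hid : (PySem.Dict.mk r).get? "id" with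
    | none => simp [hid] at hsp
    | some i =>
      simp only [hid] at hsp hpr
      cases hi : (PySem.Dict.mk r2s).get? i with
      | none => simp [hi] at hsp
      | some s =>
        simp only [hi] at hsp hpr
        by_cases h : s = ""
        · rw [if_pos h] at hsp; simp at hsp
        · rw [if_neg h] at hsp
          obtain rfl := Option.some.inj hsp
          have hpr' : s = "" ∨ s = "train" ∨ s = "val" ∨ s = "test" := by
            simpa [Bool.or_eq_true, beq_iff_eq, or_assoc] using hpr
          rcases hpr' with h' | h' | h' | h' <;> first | exact absurd h' h | (subst h'; decide)
  have hkeys : (records.foldl (pvBStep r2s)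
      (((PySem.Dict.empty.insert "train" []).insert "val" []).insert "test" [])).keys = ["train", "val", "test"] := by
    rw [pvB_keys r2s records _ hsplits]; rfl
  have hnodup : (records.foldl (pvBStep r2s)
      (((PySem.Dict.empty.insert "train" []).insert "val" []).insert "test" [])).keys.Nodup := by
    rw [hkeys]; decide
  rw [PySem.Dict.items_eq_map_keys _ hnodup [], hkeys, List.map_map]
  refine List.map_congr_left ?_
  intro s hs
  have hfield : ∀ f dflt : String,
      (((records.foldl (pvAStep r2s)
          (((PySem.Dict.empty.insert "train" PySem.Dict.empty).insert "val" PySem.Dict.empty).insert "test"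
            PySem.Dict.empty)).getD s PySem.Dict.empty).getD f PySem.Dict.empty =
        (records.filter (fun r => pvSplit r2s r == some s)).foldl
          (fun c r => c.modify ((PySem.Dict.mk r).getD f dflt) 0 (· + 1)) PySem.Dict.empty) →
      (((records.foldl (pvAStep r2s)
          (((PySem.Dict.empty.insert "train" PySem.Dict.empty).insert "val" PySem.Dict.empty).insert "test"
            PySem.Dict.empty)).getD s PySem.Dict.empty).getD f PySem.Dict.empty).items =
        pvCountField ((records.foldl (pvBStep r2s)
          (((PySem.Dict.empty.insert "train" []).insert "val" []).insert "test" [])).getD s []) f dflt := by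
    intro f dflt hf
    unfold pvCountField
    rw [pvCount_eq, pvB_outer, hf]
    have hg0 : (((PySem.Dict.empty.insert "train" ([] : List (List (String × String)))).insert "val" []).insert "test" []).getD s [] = [] := by
      fin_cases hs <;> rfl
    rw [hg0, List.nil_append]
  have hst0 : ∀ s' ∈ (["train", "val", "test"] : List String),
      ((((PySem.Dict.empty.insert "train" PySem.Dict.empty).insert "val" PySem.Dict.empty).insert "test"
        PySem.Dict.empty : PySem.Dict String (PySem.Dict String (PySem.Dict String Int))).getD s' PySem.Dict.empty) = PySem.Dict.empty := by
    decide
  simp only [Function.comp_apply]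
  rw [hfield "category" "unknown" (by rw [pvA_outer, pvField_cat, hst0 s hs, PySem.Dict.getD_empty]),
      hfield "difficulty" "medium" (by rw [pvA_outer, pvField_diff, hst0 s hs, PySem.Dict.getD_empty]),
      hfield "payload_type" "unknown" (by rw [pvA_outer, pvField_pt, hst0 s hs, PySem.Dict.getD_empty])]
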